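-- pv_equiv track=rewrite | github.com/49469/ComunicacaoDigital2 | bsc.py | interleaving
-- ===== SOURCE A (Python) =====
-- def interleaving(text, lines, col):
--     if lines * col != len(text):
--         return "error: lines*col must be equal to the size of text"
--     matrix = []
--     for i in range(lines):
--         row = []
--         for j in range(col):
--             row.append(text[i * col + j])
--         matrix.append(row)
--     string = ""
--     for c in range(col):
--         for line in range(lines):
--             a = matrix[line]
--             string += (a[c])
--     return string
-- ===== SOURCE B (Python) =====
-- def interleaving(text, lines, col):
--     if lines * col != len(text):
--         return "error: lines*col must be equal to the size of text"
--     return ''.join(text[c::col] for c in range(col))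
-- ===== Notes on version B (the rewrite author's own statement) =====
-- stated objective: idiomatic
-- what changed: Replaces the explicit 2D matrix build plus swapped nested read loops with a single join over per-column stride slices text[c::col], eliminating the matrix entirely.
import Mathlib
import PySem

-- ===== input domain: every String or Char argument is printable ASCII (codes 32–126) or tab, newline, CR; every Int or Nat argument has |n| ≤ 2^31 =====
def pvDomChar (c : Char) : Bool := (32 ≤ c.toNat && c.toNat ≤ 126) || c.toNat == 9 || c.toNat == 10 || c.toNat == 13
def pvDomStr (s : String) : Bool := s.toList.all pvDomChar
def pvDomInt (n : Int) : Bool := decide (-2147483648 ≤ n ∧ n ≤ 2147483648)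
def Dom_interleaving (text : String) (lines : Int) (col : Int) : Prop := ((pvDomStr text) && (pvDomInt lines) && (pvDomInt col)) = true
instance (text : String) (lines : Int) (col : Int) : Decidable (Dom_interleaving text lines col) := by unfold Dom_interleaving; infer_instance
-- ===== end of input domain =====

-- B replaces A's explicit 2D matrix build plus swapped nested read loops by joining per-column stride slices text[c::col] (idiomatic; same cost).


-- ===== PORT A =====
-- literal port: build the lines×col matrix row by row, then read it column-wise.
-- text[i*col+j] is in range whenever the loops run (guard lines*col = len(text)),
-- so the pyGetD default ' ' is never consulted.
def interleaving (text : String) (lines : Int) (col : Int) : String :=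
  if lines * col ≠ PySem.Str.len text then
    "error: lines*col must be equal to the size of text"
  else
    let matrix : List (List Char) :=
      (PySem.List.pyRange 0 lines 1).foldl (fun m i =>
        m ++ [((PySem.List.pyRange 0 col 1).foldl (fun row j =>
                row ++ [PySem.List.pyGetD text.toList (i * col + j) ' ']) [])]) []
    let s : List Char :=
      (PySem.List.pyRange 0 col 1).foldl (fun s c =>
        (PySem.List.pyRange 0 lines 1).foldl (fun s line =>
          s ++ [PySem.List.pyGetD (PySem.List.pyGetD matrix line []) c ' ']) s) []
    String.ofList s

-- ===== PORT B =====
-- literal port of Source B: ''.join(text[c::col] for c in range(col)).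
-- the stride col is nonzero whenever range(col) is nonempty, so slice? never
-- returns none there; .getD "" only discharges the Option.
def interleaving_alt (text : String) (lines : Int) (col : Int) : String :=
  if lines * col ≠ PySem.Str.len text then
    "error: lines*col must be equal to the size of text"
  else
    PySem.Str.join "" ((PySem.List.pyRange 0 col 1).map (fun c =>
      (PySem.Str.slice? text (some c) none col).getD ""))

-- ===== PRECONDITION & SPEC =====
def Spec_interleaving (text : String) (lines : Int) (col : Int) (out : String) : Prop := out = interleaving_alt text lines col
instance (text : String) (lines : Int) (col : Int) (out : String) : Decidable (Spec_interleaving text lines col out) := by unfold Spec_interleaving; infer_instance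

-- ===== CLAIM (what is proved, stated in full; the proofs are below) =====
def Claim_equal_interleaving : Prop := ∀ (text : String) (lines : Int) (col : Int), Dom_interleaving text lines col → Spec_interleaving text lines col (interleaving text lines col)

-- ===== LEMMAS AND PROOFS =====

-- joining with the empty separator is concatenation
theorem join_nil_sep (xss : List (List Char)) : PySem.Chars.join [] xss = xss.flatten := by
  simp [PySem.Chars.join, List.intercalate]
  induction xss with
  | nil => simp
  | cons x xs ih =>
    cases xs with
    | nil => simp
    | cons y ys => simpa [List.intersperse] using ih

-- the stride slice tl[c::C] of a string of length L*C is exactly column c of the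
-- L×C row-major matrix over tl

theorem slice_col (tl : List Char) (L C c : Nat) (hlen : tl.length = L * C)
    (hc : c < C) :
    (PySem.List.slice? tl (some (c : Int)) none (C : Int)).getD [] =
      (List.range L).map (fun k : Nat => PySem.List.pyGetD tl ((k : Int) * (C : Int) + (c : Int)) ' ') := by
  have hC : 0 < C := Nat.pos_of_ne_zero (by omega)
  have hstep : ¬ ((C : Int) = 0) := by omega
  have hsneg : ¬ ((C : Int) < 0) := by omega
  have hcneg : ¬ ((c : Int) < 0) := by omega
  simp only [PySem.List.slice?, PySem.List.sliceIndices, if_neg hstep, if_neg hsneg,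
    if_neg hcneg, hlen, if_pos (by omega : (0:Int) < (C:Int))]
  rcases Nat.eq_zero_or_pos L with hL | hL
  · subst hL; simp
  · have hclt : (c : Int) < ((L * C : Nat) : Int) := by push_cast; nlinarith
    have hmin : min (c : Int) ((L * C : Nat) : Int) = (c : Int) := min_eq_left (le_of_lt hclt)
    have hcnt : (((L * C : Nat) : Int) - (c : Int) + (C : Int) - 1) / (C : Int) = (L : Int) := by
      have h1 : ((L * C : Nat) : Int) - (c : Int) + (C : Int) - 1
          = ((C : Int) - 1 - c) + (L : Int) * (C : Int) := by push_cast; ring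
      rw [h1, Int.add_mul_ediv_right _ _ hstep,
        Int.ediv_eq_zero_of_lt (by omega) (by omega), zero_add]
    rw [hmin, if_pos hclt, hcnt]
    simp only [Int.toNat_natCast, Option.getD_some]
    apply List.filterMap_eq_map_iff_forall_eq_some.mpr
    intro k hk
    rw [List.mem_range] at hk
    have hidx : ((c : Int) + (C : Int) * (k : Int)).toNat = c + C * k := by omega
    have hlt : c + C * k < tl.length := by rw [hlen]; nlinarith
    rw [hidx, List.getElem?_eq_getElem hlt]
    have h0 : (0:Int) ≤ (k : Int) * (C : Int) + (c : Int) := by positivity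
    have h1 : ((k : Int) * (C : Int) + (c : Int)) < (tl.length : Int) := by
      rw [hlen]; push_cast; nlinarith
    rw [PySem.List.pyGetD_eq_getElem tl ' ' h0 h1]
    have hix : ((k:Int) * (C:Int) + (c:Int)) = ((c + C * k : Nat) : Int) := by push_cast; ring
    have htn : ((k:Int) * (C:Int) + (c:Int)).toNat = c + C * k := by omega
    exact congrArg some (getElem_congr rfl htn.symm hlt)


-- ===== VERDICT (by name: the statement is the Claim_ definition above) =====
theorem interleaving_spec : Claim_equal_interleaving := by
  intro text lines col _
  unfold Spec_interleaving
  unfold interleaving interleaving_alt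
  by_cases hg : lines * col ≠ PySem.Str.len text
  · simp only [if_pos hg]
  · simp only [if_neg hg]
    replace hg : lines * col = PySem.Str.len text := not_not.mp hg
    rw [PySem.Str.len_eq] at hg
    by_cases hcol : col ≤ 0
    · rw [PySem.List.pyRange_one_eq_nil hcol]
      simp [PySem.Str.join, PySem.Chars.join, List.intercalate]
    · replace hcol : (0:Int) < col := by omega
      have hlines0 : 0 ≤ lines := by nlinarith [Int.natCast_nonneg text.toList.length]
      obtain ⟨L, rfl⟩ : ∃ L : Nat, lines = (L:Int) := ⟨lines.toNat, (Int.toNat_of_nonneg hlines0).symm⟩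
      obtain ⟨C, rfl⟩ : ∃ C : Nat, col = (C:Int) := ⟨col.toNat, (Int.toNat_of_nonneg (le_of_lt hcol)).symm⟩
      have hlen : text.toList.length = L * C := by exact_mod_cast hg.symm
      simp only [PySem.List.foldl_append_singleton_eq_map, List.nil_append]
      rw [PySem.List.foldl_append_eq_flatMap]
      rw [show PySem.Str.join "" = fun parts => String.ofList (PySem.Chars.join "".toList (parts.map String.toList)) from rfl]
      simp only []
      apply congrArg String.ofList
      rw [show ("" : String).toList = [] from rfl, join_nil_sep, List.map_map,
        List.nil_append, List.flatMap_def]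
      apply congrArg List.flatten
      apply List.map_congr_left
      intro c hcmem
      rw [PySem.List.mem_pyRange_one] at hcmem
      obtain ⟨cn, rfl⟩ : ∃ cn : Nat, c = (cn:Int) := ⟨c.toNat, (Int.toNat_of_nonneg hcmem.1).symm⟩
      have hcC : cn < C := by exact_mod_cast hcmem.2
      rw [show (String.toList ∘ fun c => (PySem.Str.slice? text (some c) none (C:Int)).getD "") ((cn:Nat):Int)
            = ((PySem.List.slice? text.toList (some (cn:Int)) none (C:Int)).getD []) from by
        simp [PySem.Str.slice?]]
      rw [slice_col text.toList L C cn hlen hcC]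
      apply Eq.trans (b := (PySem.List.pyRange 0 (L:Int) 1).map
        (fun line => PySem.List.pyGetD text.toList (line * (C:Int) + (cn:Int)) ' '))
      · apply List.map_congr_left
        intro line hline
        rw [PySem.List.mem_pyRange_one] at hline
        rw [PySem.List.pyGetD_map_pyRange_of_nonneg _ _ _ _ hline.1 hline.2,
            PySem.List.pyGetD_map_pyRange_of_nonneg _ _ _ _ (by positivity) (by exact_mod_cast hcC)]
      · rw [PySem.List.pyRange_zero_nat L, List.map_map]
        rfl
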